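-- pv_equiv track=rewrite | github.com/HaruC/haru.github.io | Python/IS/PogChamp.py | encode_rodeh
-- ===== SOURCE A (Python) =====
-- def encode_rodeh(number):
--     """
--     Even-Rodeh cipher
--
--     :param number: Integer
--     :return: Binary String
--     """
--     cur = bin(number)[2:]
--     pos = [cur]
--     if number in range(1, 4):
--         return str(0)*(3 - len(bin(number)[2:])) + bin(number)[2:]
--     while len(cur) > 3:
--         cur = bin(len(cur))[2:]
--         pos.append(cur)
--     return ''.join(pos[::-1]) + str(0)
-- ===== SOURCE B (Python) =====
-- def encode_rodeh(number):
--     """Even-Rodeh cipher, written as its self-similar recursive definition."""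
--     def enc(s):
--         return s if len(s) <= 3 else enc(bin(len(s))[2:]) + s
--     cur = bin(number)[2:]
--     if 1 <= number < 4:
--         return cur.rjust(3, '0')
--     return enc(cur) + '0'
-- ===== Notes on version B (the rewrite author's own statement) =====
-- stated objective: simpler
-- what changed: Replaces the accumulate-into-a-list while-loop plus reversed join with a direct recursive function that builds the prefix chain front-to-back, eliminating the pos list and the [::-1] reversal; the B port also converts to binary with an accumulator loop instead of A's append-at-the-end recursion.
import Mathlib
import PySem

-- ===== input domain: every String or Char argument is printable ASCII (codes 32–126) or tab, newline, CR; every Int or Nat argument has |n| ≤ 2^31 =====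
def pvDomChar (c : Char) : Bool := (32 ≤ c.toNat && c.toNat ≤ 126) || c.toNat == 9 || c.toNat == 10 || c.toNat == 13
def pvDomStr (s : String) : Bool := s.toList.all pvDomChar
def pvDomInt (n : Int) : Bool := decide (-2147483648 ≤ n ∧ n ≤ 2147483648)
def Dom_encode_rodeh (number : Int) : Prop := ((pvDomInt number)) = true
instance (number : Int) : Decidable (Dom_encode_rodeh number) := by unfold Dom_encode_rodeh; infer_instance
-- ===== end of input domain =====

-- B replaces A's accumulate-then-reverse loop by a direct recursive prefix construction (simpler decomposition; same cost).
-- Loops/recursions are written with an explicit fuel counter (first argument) that only makes them total; fuel = the obvious bound.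

-- ===== PORT A =====
-- A-side binary digits: bin(n)[2:] for n ≥ 0, by recursion appending the low bit at the end
def natBitsGo : Nat → Nat → List Char
  | 0, _ => []
  | _+1, 0 => []
  | f+1, n+1 => natBitsGo f ((n+1) / 2) ++ [if (n+1) % 2 = 1 then '1' else '0']

def natBits (n : Nat) : List Char := natBitsGo n n

def binDigits (n : Nat) : List Char := if n = 0 then ['0'] else natBits n

-- Python's bin(number)[2:] (for negative n, bin gives '-0b…', so [2:] keeps a leading 'b')
def binDrop2 (number : Int) : List Char :=
  if number < 0 then 'b' :: binDigits number.natAbs else binDigits number.toNat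

-- A's while-loop: cur shrinks, pos accumulates each new cur at the back
def aLoopGo : Nat → List Char → List (List Char) → List (List Char)
  | 0, _, pos => pos
  | f+1, cur, pos =>
    if cur.length > 3 then aLoopGo f (binDigits cur.length) (pos ++ [binDigits cur.length]) else pos

def encode_rodeh (number : Int) : String :=
  let cur := binDrop2 number
  let pos := [cur]
  if 1 ≤ number ∧ number < 4 then
    String.ofList (List.replicate (3 - (binDrop2 number).length) '0' ++ binDrop2 number)
  else
    String.ofList (((aLoopGo cur.length cur pos).reverse.flatten) ++ ['0'])

-- ===== PORT B =====
-- B-side binary digits: bin(n)[2:] for n ≥ 0, as a bit-shift loop pushing low bits onto an accumulator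
def bBitsLoop : Nat → Nat → List Char → List Char
  | 0, _, acc => acc
  | f+1, n, acc => if n = 0 then acc else bBitsLoop f (n / 2) ((if n % 2 = 1 then '1' else '0') :: acc)

def bBits (n : Nat) : List Char := if n = 0 then ['0'] else bBitsLoop n n []

-- B's raw binary string of the input, bin(number)[2:]
def bRaw (number : Int) : List Char :=
  if number < 0 then 'b' :: bBits number.natAbs else bBits number.toNat

-- B's recursive enc: a short string is itself; otherwise prefix the encoding of its length
def bEncGo : Nat → List Char → List Char
  | 0, s => s
  | f+1, s => if s.length ≤ 3 then s else bEncGo f (bBits s.length) ++ s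

def bEnc (s : List Char) : List Char := bEncGo s.length s

def encode_rodeh_alt (number : Int) : String :=
  let cur := bRaw number
  if 1 ≤ number ∧ number < 4 then
    String.ofList (List.replicate (3 - cur.length) '0' ++ cur)
  else
    String.ofList (bEnc cur ++ ['0'])

-- ===== PRECONDITION & SPEC =====
def Spec_encode_rodeh (number : Int) (out : String) : Prop := out = encode_rodeh_alt number
instance (number : Int) (out : String) : Decidable (Spec_encode_rodeh number out) := by unfold Spec_encode_rodeh; infer_instance

-- ===== CLAIM (what is proved, stated in full; the proofs are below) =====
def Claim_equal_encode_rodeh : Prop := ∀ (number : Int), Dom_encode_rodeh number → Spec_encode_rodeh number (encode_rodeh number)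

-- ===== LEMMAS AND PROOFS =====

-- fuel irrelevance for natBitsGo: any fuel ≥ n computes the same digits
theorem natBitsGo_fuel : ∀ n f f', n ≤ f → n ≤ f' → natBitsGo f n = natBitsGo f' n := by
  intro n
  induction n using Nat.strong_induction_on with
  | _ n ih =>
    intro f f' hf hf'
    match n, f, f' with
    | 0, 0, 0 => rfl
    | 0, 0, _+1 => rfl
    | 0, _+1, 0 => rfl
    | 0, _+1, _+1 => rfl
    | (m+1), (g+1), (g'+1) =>
      show natBitsGo g ((m+1)/2) ++ _ = natBitsGo g' ((m+1)/2) ++ _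
      rw [ih ((m+1)/2) (Nat.div_lt_self (by omega) (by norm_num)) g g' (by omega) (by omega)]

theorem natBits_rec (m : Nat) : natBits (m+1) = natBits ((m+1)/2) ++ [if (m+1) % 2 = 1 then '1' else '0'] := by
  show natBitsGo (m+1) (m+1) = natBitsGo ((m+1)/2) ((m+1)/2) ++ _
  show natBitsGo m ((m+1)/2) ++ _ = _
  rw [natBitsGo_fuel ((m+1)/2) m ((m+1)/2) (by omega) le_rfl]

theorem natBits_len_le : ∀ n : Nat, 1 ≤ n → (natBits n).length ≤ n := by
  intro n
  induction n using Nat.strong_induction_on with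
  | _ n ih =>
    intro h1
    obtain ⟨m, rfl⟩ : ∃ m, n = m + 1 := ⟨n - 1, by omega⟩
    rw [natBits_rec]
    simp only [List.length_append, List.length_cons, List.length_nil]
    by_cases hm : m = 0
    · subst hm; simp [natBits, natBitsGo]
    · have hlt : (m+1)/2 < m+1 := Nat.div_lt_self (by omega) (by norm_num)
      have h2 : 1 ≤ (m+1)/2 := by omega
      have := ih ((m+1)/2) hlt h2
      omega

theorem binDigits_len_lt {n : Nat} (h : 3 < n) : (binDigits n).length < n := by
  rw [binDigits, if_neg (by omega)]
  have h1 : 1 ≤ n := by omega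
  have := natBits_len_le n h1
  obtain ⟨m, rfl⟩ : ∃ m, n = m + 1 := ⟨n - 1, by omega⟩
  rw [natBits_rec] at this ⊢
  simp only [List.length_append, List.length_cons, List.length_nil] at this ⊢
  have h2 : 1 ≤ (m+1)/2 := by omega
  have := natBits_len_le ((m+1)/2) h2
  omega

-- B's accumulator loop computes A's digit list followed by the accumulator
theorem bBitsLoop_eq : ∀ n f acc, n ≤ f → bBitsLoop f n acc = natBits n ++ acc := by
  intro n
  induction n using Nat.strong_induction_on with
  | _ n ih =>
    intro f acc hf
    match n, f with
    | 0, 0 => rfl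
    | 0, _+1 => rfl
    | (m+1), (g+1) =>
      show bBitsLoop g ((m+1)/2) _ = _
      rw [ih ((m+1)/2) (Nat.div_lt_self (by omega) (by norm_num)) g _ (by omega),
        natBits_rec]
      simp

theorem bBits_eq (n : Nat) : bBits n = binDigits n := by
  unfold bBits binDigits
  by_cases h : n = 0
  · simp [h]
  · rw [if_neg h, if_neg h, bBitsLoop_eq n n [] le_rfl, List.append_nil]

theorem bRaw_eq (number : Int) : bRaw number = binDrop2 number := by
  unfold bRaw binDrop2; rw [bBits_eq, bBits_eq]

-- fuel irrelevance for bEncGo: any fuel ≥ the string length computes the same result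
theorem bEncGo_fuel : ∀ s : List Char, ∀ f f', s.length ≤ f → s.length ≤ f' → bEncGo f s = bEncGo f' s := by
  have H : ∀ n : Nat, ∀ s : List Char, s.length = n → ∀ f f', n ≤ f → n ≤ f' → bEncGo f s = bEncGo f' s := by
    intro n
    induction n using Nat.strong_induction_on with
    | _ n ih =>
      intro s hs f f' hf hf'
      by_cases h3 : s.length ≤ 3
      · match f, f' with
        | 0, 0 => rfl
        | 0, _+1 => rw [bEncGo, bEncGo, if_pos h3]
        | _+1, 0 => rw [bEncGo, bEncGo, if_pos h3]
        | _+1, _+1 => rw [bEncGo, bEncGo, if_pos h3, if_pos h3]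
      · have hn : 3 < n := by omega
        obtain ⟨g, rfl⟩ : ∃ g, f = g+1 := ⟨f-1, by omega⟩
        obtain ⟨g', rfl⟩ : ∃ g', f' = g'+1 := ⟨f'-1, by omega⟩
        rw [bEncGo, bEncGo, if_neg h3, if_neg h3,
            ih (bBits s.length).length (by rw [bBits_eq]; subst hs; exact binDigits_len_lt (by omega))
              (bBits s.length) rfl g g'
              (by have := binDigits_len_lt (n := s.length) (by omega); rw [bBits_eq]; omega)
              (by have := binDigits_len_lt (n := s.length) (by omega); rw [bBits_eq]; omega)]
  intro s f f' hf hf'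
  exact H s.length s rfl f f' hf hf'

-- bEnc satisfies B's recursive equation
theorem bEnc_unfold (s : List Char) :
    bEnc s = if s.length ≤ 3 then s else bEnc (bBits s.length) ++ s := by
  unfold bEnc
  match hs : s.length with
  | 0 =>
    have : s = [] := List.eq_nil_of_length_eq_zero hs
    subst this; rfl
  | (k+1) =>
    rw [bEncGo, hs]
    by_cases h3 : k + 1 ≤ 3
    · rw [if_pos h3, if_pos h3]
    · rw [if_neg h3, if_neg h3]
      have hl : (bBits (k+1)).length ≤ k := by
        have := binDigits_len_lt (n := k+1) (by omega)
        rw [bBits_eq]; omega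
      rw [bEncGo_fuel (bBits (k+1)) k (bBits (k+1)).length hl le_rfl]

-- A's reversed-join of the accumulated list equals B's recursive prefix construction
theorem aLoopGo_flatten : ∀ f (cur : List Char) pos, cur.length ≤ f →
    ((aLoopGo f cur pos).reverse).flatten
      = (if cur.length > 3 then bEnc (binDigits cur.length) else []) ++ (pos.reverse).flatten := by
  intro f
  induction f with
  | zero =>
    intro cur pos h
    have : cur.length = 0 := by omega
    rw [aLoopGo, if_neg (by omega)]
    simp
  | succ g ih =>
    intro cur pos h
    rw [aLoopGo]
    by_cases hc : cur.length > 3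
    · rw [if_pos hc, if_pos hc,
        ih (binDigits cur.length) _ (by have := binDigits_len_lt hc; omega),
        bEnc_unfold (binDigits cur.length), bBits_eq]
      by_cases h2 : (binDigits cur.length).length ≤ 3
      · rw [if_pos h2, if_neg (by omega)]
        simp
      · rw [if_neg h2, if_pos (by omega)]
        simp
    · rw [if_neg hc, if_neg hc]
      simp

theorem key (cur : List Char) : ((aLoopGo cur.length cur [cur]).reverse).flatten = bEnc cur := by
  rw [aLoopGo_flatten cur.length cur [cur] le_rfl, bEnc_unfold cur]
  by_cases h : cur.length > 3
  · rw [if_pos h, if_neg (by omega), bBits_eq]; simp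
  · rw [if_neg h, if_pos (by omega)]; simp

-- ===== VERDICT (by name: the statement is the Claim_ definition above) =====
theorem encode_rodeh_spec : Claim_equal_encode_rodeh := by
  intro number _
  unfold Spec_encode_rodeh encode_rodeh encode_rodeh_alt
  by_cases h : 1 ≤ number ∧ number < 4
  · simp [h, bRaw_eq]
  · simp only [h, if_false, bRaw_eq, key]
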